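-- pv_equiv track=rewrite | github.com/kaushik6g/Semantic-Sonifier | models/sonifier.py | _get_genre_hint
-- ===== SOURCE A (Python) =====
-- def _get_genre_hint(caption: str, mood: str) -> str:
--     """Add intelligent genre/instrument hints based on content"""
--     caption_lower = caption.lower()
--     mood_lower = mood.lower()
--
--     # Nature scenes
--     if any(word in caption_lower for word in ['forest', 'mountain', 'ocean', 'river', 'nature']):
--         if mood_lower in ['peaceful', 'serene', 'calm']:
--             return "ambient pads and gentle flutes"
--         elif mood_lower in ['dramatic', 'intense']:
--             return "epic orchestral strings and horns"
--
--     # Urban scenes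
--     if any(word in caption_lower for word in ['city', 'building', 'street', 'urban']):
--         if mood_lower in ['energetic', 'chaotic']:
--             return "electronic beats and synth bass"
--         elif mood_lower in ['melancholic', 'somber']:
--             return "slow piano and distant city sounds"
--
--     # People/portraits
--     if any(word in caption_lower for word in ['person', 'people', 'portrait', 'face']):
--         if mood_lower in ['happy', 'joyful']:
--             return "upbeat acoustic guitar and light percussion"
--         elif mood_lower in ['mysterious', 'dreamy']:
--             return "ethereal vocals and reverbed textures"
--
--     return ""
-- ===== SOURCE B (Python) =====
-- # Inverted index keyed by MOOD: since every mood keyword is globally unique across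
-- # the three categories, we can look the mood up first, then just check the caption
-- # against that single category's keywords. No category loop, no fall-through logic.
-- _MOOD_INDEX = {
--     'peaceful':    (('forest', 'mountain', 'ocean', 'river', 'nature'), "ambient pads and gentle flutes"),
--     'serene':      (('forest', 'mountain', 'ocean', 'river', 'nature'), "ambient pads and gentle flutes"),
--     'calm':        (('forest', 'mountain', 'ocean', 'river', 'nature'), "ambient pads and gentle flutes"),
--     'dramatic':    (('forest', 'mountain', 'ocean', 'river', 'nature'), "epic orchestral strings and horns"),
--     'intense':     (('forest', 'mountain', 'ocean', 'river', 'nature'), "epic orchestral strings and horns"),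
--     'energetic':   (('city', 'building', 'street', 'urban'), "electronic beats and synth bass"),
--     'chaotic':     (('city', 'building', 'street', 'urban'), "electronic beats and synth bass"),
--     'melancholic': (('city', 'building', 'street', 'urban'), "slow piano and distant city sounds"),
--     'somber':      (('city', 'building', 'street', 'urban'), "slow piano and distant city sounds"),
--     'happy':       (('person', 'people', 'portrait', 'face'), "upbeat acoustic guitar and light percussion"),
--     'joyful':      (('person', 'people', 'portrait', 'face'), "upbeat acoustic guitar and light percussion"),
--     'mysterious':  (('person', 'people', 'portrait', 'face'), "ethereal vocals and reverbed textures"),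
--     'dreamy':      (('person', 'people', 'portrait', 'face'), "ethereal vocals and reverbed textures"),
-- }
--
-- def _get_genre_hint(caption: str, mood: str) -> str:
--     entry = _MOOD_INDEX.get(mood.lower())
--     if entry is None:
--         return ""
--     keywords, hint = entry
--     caption_lower = caption.lower()
--     return hint if any(word in caption_lower for word in keywords) else ""
-- ===== Notes on version B (the rewrite author's own statement) =====
-- stated objective: alternative
-- what changed: Inverted the lookup direction: B keys a single index by mood (mood -> keywords+hint, valid because mood keys are globally unique across categories) and then scans the caption once against that one category's keywords, instead of A's caption-first scan over three category blocks with fall-through.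
import Mathlib
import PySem

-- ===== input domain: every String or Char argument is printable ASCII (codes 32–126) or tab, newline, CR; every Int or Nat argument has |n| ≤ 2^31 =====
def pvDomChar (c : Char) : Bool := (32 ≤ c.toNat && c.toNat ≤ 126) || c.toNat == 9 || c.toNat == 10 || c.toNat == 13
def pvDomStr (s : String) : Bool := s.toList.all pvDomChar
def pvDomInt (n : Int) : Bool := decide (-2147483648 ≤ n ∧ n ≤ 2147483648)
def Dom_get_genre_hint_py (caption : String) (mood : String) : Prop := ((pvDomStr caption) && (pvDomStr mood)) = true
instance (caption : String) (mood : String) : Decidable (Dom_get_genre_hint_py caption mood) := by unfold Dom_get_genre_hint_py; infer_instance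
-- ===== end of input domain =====

-- B inverts the lookup: a single mood-keyed index (valid because mood keys are unique
-- across categories) followed by one keyword scan, instead of A's caption-first
-- category blocks with fall-through (objective: alternative).


-- ===== PORT A =====
-- Literal transliteration of A: three if-blocks in source order; falling off a block
-- continues with the next, modelled by let-bound continuations.
def get_genre_hint_py (caption : String) (mood : String) : String :=
  let caption_lower := PySem.Str.lower caption
  let mood_lower := PySem.Str.lower mood
  let after2 : String :=
    if (["person", "people", "portrait", "face"].any (fun word => PySem.Str.isIn word caption_lower)) then
      if mood_lower ∈ ["happy", "joyful"] then "upbeat acoustic guitar and light percussion"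
      else if mood_lower ∈ ["mysterious", "dreamy"] then "ethereal vocals and reverbed textures"
      else ""
    else ""
  let after1 : String :=
    if (["city", "building", "street", "urban"].any (fun word => PySem.Str.isIn word caption_lower)) then
      if mood_lower ∈ ["energetic", "chaotic"] then "electronic beats and synth bass"
      else if mood_lower ∈ ["melancholic", "somber"] then "slow piano and distant city sounds"
      else after2
    else after2
  if (["forest", "mountain", "ocean", "river", "nature"].any (fun word => PySem.Str.isIn word caption_lower)) then
    if mood_lower ∈ ["peaceful", "serene", "calm"] then "ambient pads and gentle flutes"
    else if mood_lower ∈ ["dramatic", "intense"] then "epic orchestral strings and horns"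
    else after1
  else after1

-- ===== PORT B =====
-- Inverted index keyed by mood (transliteration of Source B's _MOOD_INDEX).
def moodIndex : PySem.Dict String (List String × String) :=
  PySem.Dict.ofList
    [ ("peaceful",    (["forest", "mountain", "ocean", "river", "nature"], "ambient pads and gentle flutes")),
      ("serene",      (["forest", "mountain", "ocean", "river", "nature"], "ambient pads and gentle flutes")),
      ("calm",        (["forest", "mountain", "ocean", "river", "nature"], "ambient pads and gentle flutes")),
      ("dramatic",    (["forest", "mountain", "ocean", "river", "nature"], "epic orchestral strings and horns")),
      ("intense",     (["forest", "mountain", "ocean", "river", "nature"], "epic orchestral strings and horns")),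
      ("energetic",   (["city", "building", "street", "urban"], "electronic beats and synth bass")),
      ("chaotic",     (["city", "building", "street", "urban"], "electronic beats and synth bass")),
      ("melancholic", (["city", "building", "street", "urban"], "slow piano and distant city sounds")),
      ("somber",      (["city", "building", "street", "urban"], "slow piano and distant city sounds")),
      ("happy",       (["person", "people", "portrait", "face"], "upbeat acoustic guitar and light percussion")),
      ("joyful",      (["person", "people", "portrait", "face"], "upbeat acoustic guitar and light percussion")),
      ("mysterious",  (["person", "people", "portrait", "face"], "ethereal vocals and reverbed textures")),
      ("dreamy",      (["person", "people", "portrait", "face"], "ethereal vocals and reverbed textures")) ]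

def get_genre_hint_py_alt (caption : String) (mood : String) : String :=
  match PySem.Dict.get? moodIndex (PySem.Str.lower mood) with
  | none => ""
  | some (keywords, hint) =>
      let caption_lower := PySem.Str.lower caption
      if keywords.any (fun word => PySem.Str.isIn word caption_lower) then hint else ""

-- ===== PRECONDITION & SPEC =====
def Spec_get_genre_hint_py (caption : String) (mood : String) (out : String) : Prop := out = get_genre_hint_py_alt caption mood
instance (caption : String) (mood : String) (out : String) : Decidable (Spec_get_genre_hint_py caption mood out) := by unfold Spec_get_genre_hint_py; infer_instance

-- ===== CLAIM (what is proved, stated in full; the proofs are below) =====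
def Claim_equal_get_genre_hint_py : Prop := ∀ (caption : String) (mood : String), Dom_get_genre_hint_py caption mood → Spec_get_genre_hint_py caption mood (get_genre_hint_py caption mood)

-- ===== LEMMAS AND PROOFS =====

theorem items_moodIndex :
    moodIndex.items =
    [ ("peaceful",    (["forest", "mountain", "ocean", "river", "nature"], "ambient pads and gentle flutes")),
      ("serene",      (["forest", "mountain", "ocean", "river", "nature"], "ambient pads and gentle flutes")),
      ("calm",        (["forest", "mountain", "ocean", "river", "nature"], "ambient pads and gentle flutes")),
      ("dramatic",    (["forest", "mountain", "ocean", "river", "nature"], "epic orchestral strings and horns")),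
      ("intense",     (["forest", "mountain", "ocean", "river", "nature"], "epic orchestral strings and horns")),
      ("energetic",   (["city", "building", "street", "urban"], "electronic beats and synth bass")),
      ("chaotic",     (["city", "building", "street", "urban"], "electronic beats and synth bass")),
      ("melancholic", (["city", "building", "street", "urban"], "slow piano and distant city sounds")),
      ("somber",      (["city", "building", "street", "urban"], "slow piano and distant city sounds")),
      ("happy",       (["person", "people", "portrait", "face"], "upbeat acoustic guitar and light percussion")),
      ("joyful",      (["person", "people", "portrait", "face"], "upbeat acoustic guitar and light percussion")),
      ("mysterious",  (["person", "people", "portrait", "face"], "ethereal vocals and reverbed textures")),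
      ("dreamy",      (["person", "people", "portrait", "face"], "ethereal vocals and reverbed textures")) ] := by decide

theorem get?_moodIndex (m : String) :
    PySem.Dict.get? moodIndex m =
    (if m = "peaceful" then some (["forest", "mountain", "ocean", "river", "nature"], "ambient pads and gentle flutes")
     else if m = "serene" then some (["forest", "mountain", "ocean", "river", "nature"], "ambient pads and gentle flutes")
     else if m = "calm" then some (["forest", "mountain", "ocean", "river", "nature"], "ambient pads and gentle flutes")
     else if m = "dramatic" then some (["forest", "mountain", "ocean", "river", "nature"], "epic orchestral strings and horns")
     else if m = "intense" then some (["forest", "mountain", "ocean", "river", "nature"], "epic orchestral strings and horns")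
     else if m = "energetic" then some (["city", "building", "street", "urban"], "electronic beats and synth bass")
     else if m = "chaotic" then some (["city", "building", "street", "urban"], "electronic beats and synth bass")
     else if m = "melancholic" then some (["city", "building", "street", "urban"], "slow piano and distant city sounds")
     else if m = "somber" then some (["city", "building", "street", "urban"], "slow piano and distant city sounds")
     else if m = "happy" then some (["person", "people", "portrait", "face"], "upbeat acoustic guitar and light percussion")
     else if m = "joyful" then some (["person", "people", "portrait", "face"], "upbeat acoustic guitar and light percussion")
     else if m = "mysterious" then some (["person", "people", "portrait", "face"], "ethereal vocals and reverbed textures")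
     else if m = "dreamy" then some (["person", "people", "portrait", "face"], "ethereal vocals and reverbed textures")
     else none) := by
  by_cases h1 : m = "peaceful"; · subst h1; decide
  by_cases h2 : m = "serene"; · subst h2; decide
  by_cases h3 : m = "calm"; · subst h3; decide
  by_cases h4 : m = "dramatic"; · subst h4; decide
  by_cases h5 : m = "intense"; · subst h5; decide
  by_cases h6 : m = "energetic"; · subst h6; decide
  by_cases h7 : m = "chaotic"; · subst h7; decide
  by_cases h8 : m = "melancholic"; · subst h8; decide
  by_cases h9 : m = "somber"; · subst h9; decide
  by_cases h10 : m = "happy"; · subst h10; decide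
  by_cases h11 : m = "joyful"; · subst h11; decide
  by_cases h12 : m = "mysterious"; · subst h12; decide
  by_cases h13 : m = "dreamy"; · subst h13; decide
  have b1 : (("peaceful" : String) == m) = false := beq_eq_false_iff_ne.mpr fun e => h1 e.symm
  have b2 : (("serene" : String) == m) = false := beq_eq_false_iff_ne.mpr fun e => h2 e.symm
  have b3 : (("calm" : String) == m) = false := beq_eq_false_iff_ne.mpr fun e => h3 e.symm
  have b4 : (("dramatic" : String) == m) = false := beq_eq_false_iff_ne.mpr fun e => h4 e.symm
  have b5 : (("intense" : String) == m) = false := beq_eq_false_iff_ne.mpr fun e => h5 e.symm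
  have b6 : (("energetic" : String) == m) = false := beq_eq_false_iff_ne.mpr fun e => h6 e.symm
  have b7 : (("chaotic" : String) == m) = false := beq_eq_false_iff_ne.mpr fun e => h7 e.symm
  have b8 : (("melancholic" : String) == m) = false := beq_eq_false_iff_ne.mpr fun e => h8 e.symm
  have b9 : (("somber" : String) == m) = false := beq_eq_false_iff_ne.mpr fun e => h9 e.symm
  have b10 : (("happy" : String) == m) = false := beq_eq_false_iff_ne.mpr fun e => h10 e.symm
  have b11 : (("joyful" : String) == m) = false := beq_eq_false_iff_ne.mpr fun e => h11 e.symm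
  have b12 : (("mysterious" : String) == m) = false := beq_eq_false_iff_ne.mpr fun e => h12 e.symm
  have b13 : (("dreamy" : String) == m) = false := beq_eq_false_iff_ne.mpr fun e => h13 e.symm
  simp [PySem.Dict.get?, items_moodIndex, List.find?,
    b1, b2, b3, b4, b5, b6, b7, b8, b9, b10, b11, b12, b13,
    h1, h2, h3, h4, h5, h6, h7, h8, h9, h10, h11, h12, h13]

-- ===== VERDICT (by name: the statement is the Claim_ definition above) =====
theorem get_genre_hint_py_spec : Claim_equal_get_genre_hint_py := by
  intro caption mood _
  unfold Spec_get_genre_hint_py get_genre_hint_py get_genre_hint_py_alt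
  rw [get?_moodIndex]
  generalize PySem.Str.lower caption = cl
  generalize PySem.Str.lower mood = ml
  by_cases h1 : ml = "peaceful"; · subst h1; simp
  by_cases h2 : ml = "serene"; · subst h2; simp
  by_cases h3 : ml = "calm"; · subst h3; simp
  by_cases h4 : ml = "dramatic"; · subst h4; simp
  by_cases h5 : ml = "intense"; · subst h5; simp
  by_cases h6 : ml = "energetic"; · subst h6; simp
  by_cases h7 : ml = "chaotic"; · subst h7; simp
  by_cases h8 : ml = "melancholic"; · subst h8; simp
  by_cases h9 : ml = "somber"; · subst h9; simp
  by_cases h10 : ml = "happy"; · subst h10; simp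
  by_cases h11 : ml = "joyful"; · subst h11; simp
  by_cases h12 : ml = "mysterious"; · subst h12; simp
  by_cases h13 : ml = "dreamy"; · subst h13; simp
  simp [h1, h2, h3, h4, h5, h6, h7, h8, h9, h10, h11, h12, h13]
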